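-- pv_equiv track=rewrite | github.com/shivasanthosh/Py | Basic/waterflow.py | Redlake
-- ===== SOURCE A (Python) =====
-- def Redlake(A):
--     Redlake = [[0 for _ in range(len(A[0]))] for _ in range(len(A))]
--
--     col = 0
--     row = 0
--     maxIndex = len(A)-1
--     colMax = len(A[0])-1
--     for row in range(maxIndex, -1, -1):
--         for col in range(colMax, -1, -1):
--             if row != maxIndex and col != colMax:
--                 if A[row][col] >= A[row][col+1] or \
--                         A[row][col] >= A[row + 1][col]:
--                     if Redlake[row][col + 1] != 0:
--                         Redlake[row][col] = A[row][col]
--                     else: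
--                         Redlake[row][col] = 0
--
--                 else:
--                     Redlake[row][col] = 0
--             else:
--                 Redlake[row][col] = A[row][col]
--     return Redlake
-- ===== SOURCE B (Python) =====
-- def Redlake(A):
--     h, w = len(A), len(A[0])
--     out = []
--     for i in range(h - 1):
--         cur, nxt = A[i], A[i + 1]
--         s = 0
--         for c in range(w):
--             ok = cur[c] != 0 and (c == w - 1 or cur[c] >= cur[c + 1] or cur[c] >= nxt[c])
--             if not ok:
--                 s = c + 1
--         out.append([0] * s + cur[s:w])
--     out.append(A[h - 1][:w])
--     return out
-- ===== Notes on version B (the rewrite author's own statement) =====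
-- stated objective: alternative
-- what changed: Instead of constructing each output cell right-to-left with a per-cell branch that reads back the already-written output, B computes for each non-last row a single cutoff index s by a forward left-to-right scan (the last column where the nonzero-and-flow chain breaks) and emits the row as a zero prefix of length s followed by a direct slice of A's row; the last row is a plain copy.
import Mathlib
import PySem

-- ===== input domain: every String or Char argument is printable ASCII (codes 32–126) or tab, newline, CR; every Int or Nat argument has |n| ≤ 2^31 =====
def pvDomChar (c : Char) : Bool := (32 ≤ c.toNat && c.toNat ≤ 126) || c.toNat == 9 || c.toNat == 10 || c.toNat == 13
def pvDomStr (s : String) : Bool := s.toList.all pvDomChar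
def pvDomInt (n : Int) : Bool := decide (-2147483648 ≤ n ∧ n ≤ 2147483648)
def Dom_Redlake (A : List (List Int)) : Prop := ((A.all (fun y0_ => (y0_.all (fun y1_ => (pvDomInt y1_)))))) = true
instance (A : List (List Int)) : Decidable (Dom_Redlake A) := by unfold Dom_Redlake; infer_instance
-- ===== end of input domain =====

-- B replaces A's right-to-left per-cell construction (which reads back the output grid)
-- by a forward scan computing one cutoff index per row, then a zero prefix plus a slice.
-- Equivalence of the return values is claimed on Pre_ (exactly where the Python A returns).

-- ===== PORT A =====
-- A[r][c] for nonnegative in-range indices (Pre_ guarantees in-range; pyGetD is exact there)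
def aget2 (A : List (List Int)) (r c : Int) : Int :=
  PySem.List.pyGetD (PySem.List.pyGetD A r []) c 0

-- Redlake[r][c] = v (indices produced by the ranges are nonnegative and in range, where pySetD is exact)
def set2 (R : List (List Int)) (r c : Int) (v : Int) : List (List Int) :=
  PySem.List.pySetD R r (PySem.List.pySetD (PySem.List.pyGetD R r []) c v)

-- the body of A's inner loop, one col step
def innerStep (A : List (List Int)) (maxIndex colMax row : Int)
    (R : List (List Int)) (col : Int) : List (List Int) :=
  if row ≠ maxIndex ∧ col ≠ colMax then
    if aget2 A row col ≥ aget2 A row (col + 1) ∨ aget2 A row col ≥ aget2 A (row + 1) col then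
      if aget2 R row (col + 1) ≠ 0 then set2 R row col (aget2 A row col)
      else set2 R row col 0
    else set2 R row col 0
  else set2 R row col (aget2 A row col)

def Redlake (A : List (List Int)) : List (List Int) :=
  let init := (List.range A.length).map
    (fun _ => (List.range (A.headD []).length).map (fun _ => (0 : Int)))
  let maxIndex : Int := (A.length : Int) - 1
  let colMax : Int := ((A.headD []).length : Int) - 1
  (PySem.List.pyRange maxIndex (-1) (-1)).foldl
    (fun R row =>
      (PySem.List.pyRange colMax (-1) (-1)).foldl (innerStep A maxIndex colMax row) R)
    init

-- ===== PORT B =====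
-- Source B's `ok` at column c of row cur with next row nxt
def okB (cur nxt : List Int) (w c : Nat) : Bool :=
  decide (cur.getD c 0 ≠ 0) &&
    (decide (c = w - 1) || decide (cur.getD c 0 ≥ cur.getD (c + 1) 0)
      || decide (cur.getD c 0 ≥ nxt.getD c 0))

-- Source B's inner loop: last failing column + 1 (0 if the chain never breaks)
def cutStep (ok : Nat → Bool) (s c : Nat) : Nat := if ok c then s else c + 1
def cutoff (ok : Nat → Bool) (w : Nat) : Nat := (List.range w).foldl (cutStep ok) 0

def Redlake_alt (A : List (List Int)) : List (List Int) :=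
  let h := A.length
  let w := (A.headD []).length
  ((List.range (h - 1)).map (fun i =>
      let cur := A.getD i []
      let s := cutoff (okB cur (A.getD (i + 1) []) w) w
      List.replicate s 0 ++ (cur.take w).drop s))
    ++ [(A.getD (h - 1) []).take w]

-- ===== PRECONDITION & SPEC =====
-- exactly where the Python A returns: A nonempty and no row shorter than row 0
def Pre_Redlake (A : List (List Int)) : Prop :=
  A ≠ [] ∧ ∀ r ∈ A, (A.headD []).length ≤ r.length
instance (A : List (List Int)) : Decidable (Pre_Redlake A) := by unfold Pre_Redlake; infer_instance

def pvWitness_Redlake : List (List Int) := [[1, 2], [3, 4]]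

def Spec_Redlake (A : List (List Int)) (out : List (List Int)) : Prop := out = Redlake_alt A
instance (A : List (List Int)) (out : List (List Int)) : Decidable (Spec_Redlake A out) := by unfold Spec_Redlake; infer_instance

-- ===== CLAIM (what is proved, stated in full; the proofs are below) =====
def Claim_equal_Redlake : Prop := ∀ (A : List (List Int)), Dom_Redlake A → Pre_Redlake A → Spec_Redlake A (Redlake A)

-- ===== LEMMAS AND PROOFS =====

-- the final value of row r, positions j..w-1, as one recursive function (A's invariant)
def suf (last : Bool) (cur next : List Int) (w j : Nat) : List Int :=
  if _h : j < w then
    let rest := suf last cur next w (j + 1)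
    let v : Int :=
      if last ∨ j = w - 1 then cur.getD j 0
      else if (cur.getD j 0 ≥ cur.getD (j + 1) 0 ∨ cur.getD j 0 ≥ next.getD j 0) ∧ rest.headD 0 ≠ 0 then
        cur.getD j 0
      else 0
    v :: rest
  else []
termination_by w - j

theorem suf_ge (last : Bool) (cur next : List Int) (w j : Nat) (h : w ≤ j) :
    suf last cur next w j = [] := by
  rw [suf]; simp [Nat.not_lt.mpr h]

-- the last row: suf true is a take
theorem suf_true (cur next : List Int) (w : Nat) (hw : w ≤ cur.length) :
    ∀ j, suf true cur next w j = (cur.take w).drop j := by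
  intro j
  induction hj : w - j generalizing j with
  | zero =>
    have : w ≤ j := by omega
    rw [suf_ge _ _ _ _ _ this, List.drop_eq_nil_of_le (by simp; omega)]
  | succ k ih =>
    have hlt : j < w := by omega
    rw [suf, dif_pos hlt]
    simp only [true_or, if_true]
    have h1 : j < (cur.take w).length := by simp; omega
    rw [List.drop_eq_getElem_cons h1, ih (j + 1) (by omega)]
    congr 1
    rw [List.getElem_take, List.getD_eq_getElem _ _ (by omega)]

-- characterization of Source B's cutoff index
theorem cutoff_spec (ok : Nat → Bool) (w : Nat) :
    cutoff ok w ≤ w ∧ (∀ c, cutoff ok w ≤ c → c < w → ok c = true) ∧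
      (cutoff ok w = 0 ∨ ok (cutoff ok w - 1) = false) := by
  induction w with
  | zero => exact ⟨le_rfl, fun c h1 h2 => absurd h2 (by omega), Or.inl rfl⟩
  | succ w ih =>
    obtain ⟨h1, h2, h3⟩ := ih
    have hstep : cutoff ok (w + 1) = cutStep ok (cutoff ok w) w := by
      unfold cutoff
      rw [List.range_succ, List.foldl_append]
      rfl
    unfold cutStep at hstep
    by_cases hok : ok w = true
    · rw [hstep, if_pos hok]
      refine ⟨by omega, fun c hc1 hc2 => ?_, h3⟩
      by_cases hcw : c = w
      · subst hcw; exact hok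
      · exact h2 c hc1 (by omega)
    · rw [hstep, if_neg hok]
      refine ⟨le_rfl, fun c hc1 hc2 => absurd hc2 (by omega), Or.inr (by simpa using hok)⟩

-- the row A computes (suf false) is exactly B's zero prefix + slice
theorem suf_eq_cut (cur nxt : List Int) (w : Nat) (hw : w ≤ cur.length) :
    ∀ j, suf false cur nxt w j
      = List.replicate (cutoff (okB cur nxt w) w - j) 0
        ++ (cur.take w).drop (max j (cutoff (okB cur nxt w) w)) := by
  obtain ⟨hs1, hs2, hs3⟩ := cutoff_spec (okB cur nxt w) w
  set s := cutoff (okB cur nxt w) w with hs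
  intro j
  induction hj : w - j generalizing j with
  | zero =>
    have hjw : w ≤ j := by omega
    rw [suf_ge _ _ _ _ _ hjw, Nat.sub_eq_zero_of_le (by omega), List.replicate_zero,
      List.nil_append, List.drop_eq_nil_of_le (by simp; omega)]
  | succ k ih =>
    have hlt : j < w := by omega
    have hrest := ih (j + 1) (by omega)
    rw [suf, dif_pos hlt]
    simp only [Bool.false_eq_true, false_or]
    rw [hrest]
    have htl : j < (cur.take w).length := by simp; omega
    by_cases hjs : s ≤ j
    · -- inside the surviving suffix: value is cur[j]
      have hok := hs2 j hjs hlt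
      unfold okB at hok
      simp only [Bool.and_eq_true, Bool.or_eq_true, decide_eq_true_eq] at hok
      have hdrop : (cur.take w).drop (max j s) = cur.getD j 0 :: (cur.take w).drop (max (j + 1) s) := by
        rw [Nat.max_eq_left hjs, Nat.max_eq_left (by omega : s ≤ j + 1), List.drop_eq_getElem_cons htl]
        congr 1
        rw [List.getElem_take]
        exact (List.getD_eq_getElem _ _ (by omega : j < cur.length)).symm
      rw [Nat.sub_eq_zero_of_le hjs, Nat.sub_eq_zero_of_le (by omega : s ≤ j + 1)]
      simp only [List.replicate_zero, List.nil_append]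
      rw [hdrop]
      congr 1
      by_cases hjw1 : j = w - 1
      · rw [if_pos hjw1]
      · rw [if_neg hjw1]
        have hcond : cur.getD j 0 ≥ cur.getD (j + 1) 0 ∨ cur.getD j 0 ≥ nxt.getD j 0 := by
          rcases hok.2 with (h | h) | h
          · exact absurd h hjw1
          · exact Or.inl h
          · exact Or.inr h
        have hok1 := hs2 (j + 1) (by omega) (by omega)
        unfold okB at hok1
        simp only [Bool.and_eq_true, decide_eq_true_eq] at hok1
        have hhead : ((cur.take w).drop (max (j + 1) s)).headD 0 = cur.getD (j + 1) 0 := by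
          rw [Nat.max_eq_left (by omega : s ≤ j + 1),
            List.drop_eq_getElem_cons (by simp; omega : j + 1 < (cur.take w).length)]
          rw [List.headD_cons, List.getElem_take]
          exact (List.getD_eq_getElem _ _ (by omega : j + 1 < cur.length)).symm
        rw [if_pos ⟨hcond, by rw [hhead]; exact hok1.1⟩]
    · -- before the cutoff: value is 0
      rw [Nat.not_le] at hjs
      have hrep : List.replicate (s - j) (0 : Int) = 0 :: List.replicate (s - (j + 1)) 0 := by
        rw [show s - j = (s - (j + 1)) + 1 by omega, List.replicate_succ]
      rw [Nat.max_eq_right (by omega : j ≤ s), hrep, List.cons_append]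
      congr 1
      · -- v = 0
        by_cases hjs1 : j + 1 = s
        · -- the breaking column
          have hbad : okB cur nxt w (s - 1) = false := by
            rcases hs3 with h | h
            · omega
            · exact h
          rw [show s - 1 = j by omega] at hbad
          unfold okB at hbad
          simp only [Bool.and_eq_false_iff, Bool.or_eq_false_iff, decide_eq_false_iff_not,
            not_not, not_le] at hbad
          by_cases hjw1 : j = w - 1
          · rw [if_pos hjw1]
            rcases hbad with h | ⟨⟨h1, _⟩, _⟩
            · exact h
            · exact absurd hjw1 h1
          · rw [if_neg hjw1]
            split_ifs with hcnd
            · rcases hbad with h | ⟨⟨_, h2⟩, h3⟩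
              · exact h
              · rcases hcnd.1 with hc | hc
                · omega
                · omega
            · rfl
        · -- strictly left of the break: head of rest is 0
          have hj2 : j + 1 < s := by omega
          have hhead0 : (List.replicate (s - (j + 1)) (0 : Int)
              ++ (cur.take w).drop (max (j + 1) s)).headD 0 = 0 := by
            rw [show s - (j + 1) = (s - (j + 2)) + 1 by omega, List.replicate_succ,
              List.cons_append, List.headD_cons]
          rw [if_neg (by omega : ¬ j = w - 1)]
          split_ifs with hcnd
          · exact absurd hhead0 hcnd.2
          · rfl
      · rw [Nat.max_eq_right (by omega : j + 1 ≤ s)]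

-- convenient forms of aget2 / set2 on cast indices
theorem aget2_cast (A : List (List Int)) (r c : Nat) :
    aget2 A (r : Int) (c : Int) = (A.getD r []).getD c 0 := by
  simp [aget2]

theorem set2_cast (R : List (List Int)) (r c : Nat) (v : Int) :
    set2 R (r : Int) (c : Int) v = R.set r ((R.getD r []).set c v) := by
  simp [set2]

-- A's inner loop, specialized to a fixed row, fills that row with suf
theorem innerA (A : List (List Int)) (n w : Nat) (hn : A.length = n) (hw : (A.headD []).length = w)
    (r : Nat) (hr : r < n) (R : List (List Int)) (hR : R.length = n) :
    ∀ c, c ≤ w → ∀ P : List Int, P.length = c →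
      (PySem.List.pyRange ((c : Int) - 1) (-1) (-1)).foldl
        (innerStep A ((n : Int) - 1) ((w : Int) - 1) (r : Int))
        (R.set r (P ++ suf (decide (r = n - 1)) (A.getD r []) (A.getD (r + 1) []) w c))
      = R.set r (suf (decide (r = n - 1)) (A.getD r []) (A.getD (r + 1) []) w 0) := by
  intro c
  induction c with
  | zero =>
    intro _ P hP
    rw [List.length_eq_zero_iff.mp hP]
    rw [PySem.List.pyRange_neg_one_eq_nil (by omega)]
    simp
  | succ c ih =>
    intro hc P hP
    have hstep : ((c + 1 : Nat) : Int) - 1 = (c : Nat) := by push_cast; ring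
    rw [hstep, PySem.List.pyRange_neg_one_cons (by omega : (-1 : Int) < (c : Nat))]
    simp only [List.foldl_cons]
    set last := decide (r = n - 1) with hlast
    set cur := A.getD r [] with hcur
    set next := A.getD (r + 1) [] with hnext
    have hcw : c < w := hc
    -- the grid before this step
    set S := suf last cur next w (c + 1) with hS
    -- value written by innerStep at col c equals suf's head value at c
    have hget_row : (R.set r (P ++ S)).getD r [] = P ++ S := by
      rw [List.getD_eq_getElem _ _ (by rw [List.length_set]; omega)]
      exact List.getElem_set_self (by rw [List.length_set]; omega)
    have hread : aget2 (R.set r (P ++ S)) (r : Int) ((c : Int) + 1) = S.headD 0 := by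
      have : ((c : Int) + 1) = ((c + 1 : Nat) : Int) := by push_cast; ring
      rw [this, aget2_cast, hget_row]
      rw [List.getD_append_right _ _ _ _ (by omega), hP, Nat.sub_self]
      cases S <;> rfl
    have hAread : ∀ j : Nat, aget2 A (r : Int) (j : Int) = cur.getD j 0 := fun j => aget2_cast A r j
    have hAread1 : aget2 A (r : Int) ((c : Int) + 1) = cur.getD (c + 1) 0 := by
      rw [show ((c : Int) + 1) = ((c + 1 : Nat) : Int) by push_cast; ring]; exact hAread _
    have hAreadN : aget2 A ((r : Int) + 1) (c : Int) = next.getD c 0 := by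
      rw [show ((r : Int) + 1) = ((r + 1 : Nat) : Int) by push_cast; ring]
      exact aget2_cast A (r + 1) c
    -- the written row equals P.take c ++ suf … c
    have hset : ∀ v : Int, set2 (R.set r (P ++ S)) (r : Int) (c : Int) v
        = R.set r (P.take c ++ (v :: S)) := by
      intro v
      rw [set2_cast, hget_row, List.set_set]
      congr 1
      rw [List.set_append_left _ _ (by omega)]
      have : P.set c v = P.take c ++ [v] := by
        have := List.set_eq_take_append_cons_drop (l := P) (i := c) (a := v)
        simpa [hP, List.drop_eq_nil_of_le (by omega : P.length ≤ c + 1)] using this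
      rw [this, List.append_assoc]; rfl
    -- case split exactly like the Python
    have hmain : innerStep A ((n : Int) - 1) ((w : Int) - 1) (r : Int) (R.set r (P ++ S)) (c : Int)
        = R.set r (P.take c ++ suf last cur next w c) := by
      rw [suf]
      simp only [hcw, dif_pos]
      rw [← hS]
      unfold innerStep
      rw [hAread c, hAread1, hAreadN, hread]
      have hlast' : (last = true) ↔ r = n - 1 := by simp [hlast]
      split_ifs with p1 p2 p3 p4 p5 <;> rw [hset] <;> try rfl
      all_goals exfalso
      all_goals simp only [hlast', ne_eq, not_and_or, not_not, not_or] at *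
      all_goals omega
    rw [hmain]
    exact ih (by omega) (P.take c) (by simp [hP])

-- helper: the grids G_k used in the outer induction
def gridK (A : List (List Int)) (n w k : Nat) : List (List Int) :=
  (List.range n).map (fun r =>
    if k ≤ r then suf (decide (r = n - 1)) (A.getD r []) (A.getD (r + 1) []) w 0
    else (List.range w).map (fun _ => (0 : Int)))

theorem gridK_set (A : List (List Int)) (n w k : Nat) (hk : k < n) :
    (gridK A n w (k + 1)).set k
        (suf (decide (k = n - 1)) (A.getD k []) (A.getD (k + 1) []) w 0)
      = gridK A n w k := by
  apply List.ext_getElem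
  · simp [gridK]
  · intro i h1 h2
    simp only [gridK, List.length_map, List.length_range] at h2
    by_cases hik : i = k
    · subst hik
      rw [List.getElem_set_self (by simp [gridK]; omega)]
      simp [gridK, List.getElem_map]
    · rw [List.getElem_set_ne (by omega)]
      simp only [gridK, List.getElem_map, List.getElem_range]
      by_cases hle : k + 1 ≤ i
      · rw [if_pos hle, if_pos (by omega)]
      · rw [if_neg hle, if_neg (by omega)]

theorem outerA (A : List (List Int)) (n w : Nat) (hn : A.length = n) (hw : (A.headD []).length = w) :
    ∀ k, k ≤ n →
      (PySem.List.pyRange ((k : Int) - 1) (-1) (-1)).foldl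
        (fun R row =>
          (PySem.List.pyRange ((w : Int) - 1) (-1) (-1)).foldl
            (innerStep A ((n : Int) - 1) ((w : Int) - 1) row) R)
        (gridK A n w k)
      = gridK A n w 0 := by
  intro k
  induction k with
  | zero =>
    intro _
    have h0 : PySem.List.pyRange (((0 : Nat) : Int) - 1) (-1) (-1) = [] :=
      PySem.List.pyRange_neg_one_eq_nil (by omega)
    rw [h0]
    rfl
  | succ k ih =>
    intro hk
    have hstep : ((k + 1 : Nat) : Int) - 1 = (k : Nat) := by push_cast; ring
    rw [hstep, PySem.List.pyRange_neg_one_cons (by omega : (-1 : Int) < (k : Nat))]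
    simp only [List.foldl_cons]
    have hklt : k < n := hk
    have hrow : (gridK A n w (k + 1)) = (gridK A n w (k + 1)).set k
        (((List.range w).map (fun _ => (0 : Int)))
          ++ suf (decide (k = n - 1)) (A.getD k []) (A.getD (k + 1) []) w w) := by
      rw [suf_ge _ _ _ _ _ le_rfl, List.append_nil]
      apply List.ext_getElem
      · simp [gridK]
      · intro i h1 h2
        by_cases hik : i = k
        · subst hik
          rw [List.getElem_set_self (by simp [gridK]; omega)]
          simp only [gridK, List.getElem_map, List.getElem_range]
          rw [if_neg (by omega)]
        · rw [List.getElem_set_ne (by omega)]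
    have hcw : ((w : Int) - 1) = ((w : Nat) : Int) - 1 := rfl
    rw [hrow]
    rw [innerA A n w hn hw k hklt (gridK A n w (k + 1)) (by simp [gridK]) w le_rfl _ (by simp)]
    rw [gridK_set A n w k hklt]
    exact ih (by omega)

-- Redlake computes gridK … 0
theorem RedlakeA_eq (A : List (List Int)) :
    Redlake A = gridK A A.length (A.headD []).length 0 := by
  unfold Redlake
  have h := outerA A A.length (A.headD []).length rfl rfl A.length le_rfl
  have hinit : gridK A A.length (A.headD []).length A.length
      = (List.range A.length).map
        (fun _ => (List.range (A.headD []).length).map (fun _ => (0 : Int))) := by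
    unfold gridK
    apply List.map_congr_left
    intro r hr
    rw [List.mem_range] at hr
    rw [if_neg (by omega)]
  rw [← hinit]
  exact h

-- ===== VERDICT (by name: the statement is the Claim_ definition above) =====
theorem Redlake_spec : Claim_equal_Redlake := by
  intro A _ hpre
  obtain ⟨hne, hlen⟩ := hpre
  unfold Spec_Redlake
  rw [RedlakeA_eq]
  set n := A.length with hn
  set w := (A.headD []).length with hw
  have hn1 : 1 ≤ n := by
    rcases A with _ | _
    · exact absurd rfl hne
    · simp [hn]
  have hrowlen : ∀ r : Nat, r < n → w ≤ (A.getD r []).length := by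
    intro r hr
    apply hlen
    rw [List.getD_eq_getElem _ _ (by omega)]
    exact List.getElem_mem _
  unfold Redlake_alt gridK
  rw [← hw, ← hn]
  have hrange : List.range n = List.range (n - 1) ++ [n - 1] := by
    rw [show n = (n - 1) + 1 by omega, List.range_succ]
    simp
  rw [hrange, List.map_append]
  congr 1
  · apply List.map_congr_left
    intro r hr
    rw [List.mem_range] at hr
    rw [if_pos (by omega)]
    rw [show (decide (r = n - 1)) = false by simp; omega]
    rw [suf_eq_cut (A.getD r []) (A.getD (r + 1) []) w (hrowlen r (by omega)) 0]
    simp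
  · simp only [List.map_cons, List.map_nil]
    have hsuf : suf (decide True) (A.getD (n - 1) []) (A.getD (n - 1 + 1) []) w 0
        = List.take w (A.getD (n - 1) []) := by
      rw [show (decide True) = true by simp, suf_true _ _ _ (hrowlen (n - 1) (by omega)) 0,
        List.drop_zero]
    rw [hsuf]
    rfl
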